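-- pv_equiv track=rewrite | github.com/budprat/agentic_5 | src/a2a_mcp/common/reference_intelligence.py | _enhance_query_for_arxiv_domain
-- ===== SOURCE A (Python) =====
-- def _enhance_query_for_arxiv_domain(query: str, domain: str) -> str:
--     """Enhance query with domain-specific ArXiv categories and keywords."""
--     query_lower = query.lower()
--
--     # Enhanced domain categorization with keyword detection
--     domain_categories = {
--         "computer_science": "cat:cs.*",
--         "technical_analysis": "cat:cs.*",
--         "physics": "cat:physics.*",
--         "physical_analysis": "cat:physics.*",
--         "mathematics": "cat:math.*",
--         "life_sciences": "cat:q-bio.*",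
--         "economics": "cat:econ.*",
--         "social_sciences": "cat:cs.CY OR cat:physics.soc-ph",  # Computers and Society, Social Physics
--         "environmental_studies": "cat:physics.ao-ph OR cat:q-bio.PE",  # Atmospheric Physics, Populations and Evolution
--     }
--
--     # Enhanced keyword-based category detection
--     if any(word in query_lower for word in ["neural", "machine learning", "deep learning", "ai", "artificial intelligence"]):
--         category_filter = "cat:cs.LG OR cat:cs.AI OR cat:cs.CV OR cat:cs.CL"  # ML, AI, Computer Vision, Computational Linguistics
--     elif any(word in query_lower for word in ["quantum", "qubit", "quantum computing"]):
--         category_filter = "cat:quant-ph OR cat:cs.ET"  # Quantum Physics, Emerging Technologies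
--     elif any(word in query_lower for word in ["climate", "environment", "carbon", "energy"]):
--         category_filter = "cat:physics.ao-ph OR cat:physics.gen-ph OR cat:q-bio.PE"  # Atmospheric, General Physics, Populations
--     elif any(word in query_lower for word in ["education", "learning", "teaching"]):
--         category_filter = "cat:cs.CY OR cat:cs.HC"  # Computers and Society, Human-Computer Interaction
--     else:
--         # Fallback to domain-based categorization
--         category_filter = domain_categories.get(domain, "")
--
--     if category_filter:
--         return f"({query}) AND ({category_filter})"
--     return query
-- ===== SOURCE B (Python) =====
-- # B: flat keyword->rank index scanned once with a min-rank accumulator (priority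
-- # selection) instead of an if/elif chain of group tests; same output.
-- _KEYWORD_RANK = [
--     ("neural", 0), ("machine learning", 0), ("deep learning", 0), ("ai", 0),
--     ("artificial intelligence", 0),
--     ("quantum", 1), ("qubit", 1), ("quantum computing", 1),
--     ("climate", 2), ("environment", 2), ("carbon", 2), ("energy", 2),
--     ("education", 3), ("learning", 3), ("teaching", 3),
-- ]
--
-- _FILTERS = [
--     "cat:cs.LG OR cat:cs.AI OR cat:cs.CV OR cat:cs.CL",
--     "cat:quant-ph OR cat:cs.ET",
--     "cat:physics.ao-ph OR cat:physics.gen-ph OR cat:q-bio.PE",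
--     "cat:cs.CY OR cat:cs.HC",
-- ]
--
-- _DOMAIN_CATEGORIES = {
--     "computer_science": "cat:cs.*",
--     "technical_analysis": "cat:cs.*",
--     "physics": "cat:physics.*",
--     "physical_analysis": "cat:physics.*",
--     "mathematics": "cat:math.*",
--     "life_sciences": "cat:q-bio.*",
--     "economics": "cat:econ.*",
--     "social_sciences": "cat:cs.CY OR cat:physics.soc-ph",
--     "environmental_studies": "cat:physics.ao-ph OR cat:q-bio.PE",
-- }
--
-- def _enhance_query_for_arxiv_domain(query: str, domain: str) -> str:
--     query_lower = query.lower()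
--     best = None
--     for kw, rank in _KEYWORD_RANK:
--         if kw in query_lower:
--             best = rank if best is None else min(best, rank)
--     if best is not None:
--         category_filter = _FILTERS[best]
--     else:
--         category_filter = _DOMAIN_CATEGORIES.get(domain, "")
--     if not category_filter:
--         return query
--     return f"({query}) AND ({category_filter})"
-- ===== Notes on version B (the rewrite author's own statement) =====
-- stated objective: alternative
-- what changed: The if/elif chain of group tests is replaced by a single pass over a flat keyword->rank index keeping the minimum matched rank (priority selection), which then indexes a filter table; first-match-group becomes min-rank-among-matched-keywords.
import Mathlib
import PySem

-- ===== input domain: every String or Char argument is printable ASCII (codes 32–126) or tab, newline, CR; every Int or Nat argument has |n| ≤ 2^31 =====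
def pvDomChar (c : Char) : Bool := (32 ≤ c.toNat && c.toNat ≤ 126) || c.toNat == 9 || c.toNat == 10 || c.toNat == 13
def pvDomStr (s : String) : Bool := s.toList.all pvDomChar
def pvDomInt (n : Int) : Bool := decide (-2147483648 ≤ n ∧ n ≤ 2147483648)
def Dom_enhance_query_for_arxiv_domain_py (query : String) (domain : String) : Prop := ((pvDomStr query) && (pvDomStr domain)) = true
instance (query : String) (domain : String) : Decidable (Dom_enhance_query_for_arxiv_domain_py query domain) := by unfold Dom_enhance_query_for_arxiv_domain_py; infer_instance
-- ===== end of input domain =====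

-- B replaces the if/elif chain by a single min-rank pass over a flat keyword index; objective: alternative.

-- ===== PORT A =====
def enhance_query_for_arxiv_domain_py (query : String) (domain : String) : String :=
  let query_lower := PySem.Str.lower query
  let domain_categories : PySem.Dict String String := PySem.Dict.ofList
    [("computer_science", "cat:cs.*"), ("technical_analysis", "cat:cs.*"),
     ("physics", "cat:physics.*"), ("physical_analysis", "cat:physics.*"),
     ("mathematics", "cat:math.*"), ("life_sciences", "cat:q-bio.*"),
     ("economics", "cat:econ.*"),
     ("social_sciences", "cat:cs.CY OR cat:physics.soc-ph"),
     ("environmental_studies", "cat:physics.ao-ph OR cat:q-bio.PE")]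
  let category_filter :=
    if ["neural", "machine learning", "deep learning", "ai", "artificial intelligence"].any
        (fun word => PySem.Str.isIn word query_lower) then
      "cat:cs.LG OR cat:cs.AI OR cat:cs.CV OR cat:cs.CL"
    else if ["quantum", "qubit", "quantum computing"].any
        (fun word => PySem.Str.isIn word query_lower) then
      "cat:quant-ph OR cat:cs.ET"
    else if ["climate", "environment", "carbon", "energy"].any
        (fun word => PySem.Str.isIn word query_lower) then
      "cat:physics.ao-ph OR cat:physics.gen-ph OR cat:q-bio.PE"
    else if ["education", "learning", "teaching"].any
        (fun word => PySem.Str.isIn word query_lower) then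
      "cat:cs.CY OR cat:cs.HC"
    else
      domain_categories.getD domain ""
  if category_filter ≠ "" then "(" ++ query ++ ") AND (" ++ category_filter ++ ")"
  else query

-- ===== PORT B =====
def arxivKeywordRank : List (String × Nat) :=
  [("neural", 0), ("machine learning", 0), ("deep learning", 0), ("ai", 0),
   ("artificial intelligence", 0),
   ("quantum", 1), ("qubit", 1), ("quantum computing", 1),
   ("climate", 2), ("environment", 2), ("carbon", 2), ("energy", 2),
   ("education", 3), ("learning", 3), ("teaching", 3)]

def arxivFilters : List String :=
  ["cat:cs.LG OR cat:cs.AI OR cat:cs.CV OR cat:cs.CL",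
   "cat:quant-ph OR cat:cs.ET",
   "cat:physics.ao-ph OR cat:physics.gen-ph OR cat:q-bio.PE",
   "cat:cs.CY OR cat:cs.HC"]

def arxivDomainCategories : PySem.Dict String String := PySem.Dict.ofList
  [("computer_science", "cat:cs.*"), ("technical_analysis", "cat:cs.*"),
   ("physics", "cat:physics.*"), ("physical_analysis", "cat:physics.*"),
   ("mathematics", "cat:math.*"), ("life_sciences", "cat:q-bio.*"),
   ("economics", "cat:econ.*"),
   ("social_sciences", "cat:cs.CY OR cat:physics.soc-ph"),
   ("environmental_studies", "cat:physics.ao-ph OR cat:q-bio.PE")]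

-- the loop body of B: keep the minimum rank of any matched keyword
def arxivStep (query_lower : String) (best : Option Nat) (p : String × Nat) : Option Nat :=
  if PySem.Str.isIn p.1 query_lower then
    match best with
    | none => some p.2
    | some j => some (min j p.2)
  else best

def enhance_query_for_arxiv_domain_py_alt (query : String) (domain : String) : String :=
  let query_lower := PySem.Str.lower query
  let best := arxivKeywordRank.foldl (arxivStep query_lower) none
  let category_filter :=
    match best with
    | some r => arxivFilters.getD r ""   -- _FILTERS[best]: r is always 0..3, in range
    | none => arxivDomainCategories.getD domain ""
  if category_filter = "" then query
  else "(" ++ query ++ ") AND (" ++ category_filter ++ ")"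

-- ===== PRECONDITION & SPEC =====
def Spec_enhance_query_for_arxiv_domain_py (query : String) (domain : String) (out : String) : Prop := out = enhance_query_for_arxiv_domain_py_alt query domain
instance (query : String) (domain : String) (out : String) : Decidable (Spec_enhance_query_for_arxiv_domain_py query domain out) := by unfold Spec_enhance_query_for_arxiv_domain_py; infer_instance

-- ===== CLAIM (what is proved, stated in full; the proofs are below) =====
def Claim_equal_enhance_query_for_arxiv_domain_py : Prop := ∀ (query : String) (domain : String), Dom_enhance_query_for_arxiv_domain_py query domain → Spec_enhance_query_for_arxiv_domain_py query domain (enhance_query_for_arxiv_domain_py query domain)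

-- ===== LEMMAS AND PROOFS =====

-- fold of one rank-i group: matched ⇒ min in the rank, else unchanged
lemma fold_group (ql : String) (ws : List String) (i : Nat) (acc : Option Nat) :
    (ws.map (fun w => (w, i))).foldl (arxivStep ql) acc =
      if ws.any (fun w => PySem.Str.isIn w ql) then
        (match acc with | none => some i | some j => some (min j i))
      else acc := by
  induction ws generalizing acc with
  | nil => simp
  | cons w ws ih =>
    simp only [List.map, List.foldl, List.any_cons, arxivStep]
    by_cases h : PySem.Str.isIn w ql = true
    · simp only [h, ih, Bool.true_or]
      cases acc <;> split <;> simp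
    · have h' : PySem.Str.isIn w ql = false := by simpa using h
      rw [if_neg h, ih]
      simp only [h', Bool.false_or]

lemma arxivKeywordRank_eq :
    arxivKeywordRank =
      (["neural", "machine learning", "deep learning", "ai", "artificial intelligence"].map (fun w => (w, 0)))
      ++ (["quantum", "qubit", "quantum computing"].map (fun w => (w, 1)))
      ++ (["climate", "environment", "carbon", "energy"].map (fun w => (w, 2)))
      ++ (["education", "learning", "teaching"].map (fun w => (w, 3))) := by
  rfl

-- ===== VERDICT (by name: the statement is the Claim_ definition above) =====
theorem enhance_query_for_arxiv_domain_py_spec : Claim_equal_enhance_query_for_arxiv_domain_py := by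
  intro query domain _
  unfold Spec_enhance_query_for_arxiv_domain_py
  unfold enhance_query_for_arxiv_domain_py enhance_query_for_arxiv_domain_py_alt
  rw [arxivKeywordRank_eq]
  simp only [List.foldl_append, fold_group]
  by_cases h1 : ["neural", "machine learning", "deep learning", "ai", "artificial intelligence"].any
      (fun w => PySem.Str.isIn w (PySem.Str.lower query)) = true <;>
  by_cases h2 : ["quantum", "qubit", "quantum computing"].any
      (fun w => PySem.Str.isIn w (PySem.Str.lower query)) = true <;>
  by_cases h3 : ["climate", "environment", "carbon", "energy"].any
      (fun w => PySem.Str.isIn w (PySem.Str.lower query)) = true <;>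
  by_cases h4 : ["education", "learning", "teaching"].any
      (fun w => PySem.Str.isIn w (PySem.Str.lower query)) = true <;>
  simp only [h1, h2, h3, h4, if_true] <;>
  first
    | rfl
    | (simp only [arxivFilters, arxivDomainCategories]; split_ifs <;> simp_all)
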